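-- pv_equiv track=rewrite | github.com/tsnellgrove/oop_learning | techwtim/dc3_interp_helper.py | input_cleanup
-- ===== SOURCE A (Python) =====
-- articles_lst = ['a', 'an', 'the']
--
-- abreviations_dict = {
-- 		'n' : 'north',
-- 		's' : 'south',
-- 		'e' : 'east',
-- 		'w' : 'west',
-- 		'i' : 'inventory',
-- 		'l' : 'look',
-- 		'get' : 'take',
-- 		'x' : 'examine',
-- 		'q' : 'quit'
-- }
--
-- def input_cleanup(user_input):
-- 		# first, convert user input string into word list
-- 		lst = []
-- 		lst.append(user_input)
-- 		user_input_lst = lst[0].split()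
-- 		# next, convert all words to lower case and substitute abreviations
-- 		n = 0
-- 		for word in user_input_lst:
-- 				word = word.lower()
-- 				if word in abreviations_dict:
-- 						word = abreviations_dict[word]
-- 				user_input_lst[n] = word
-- 				n += 1
-- 		# finally, strip out articles
-- 		for article in articles_lst:
-- 				user_input_lst = [word for word in user_input_lst if word != article]
-- 		return user_input_lst
-- ===== SOURCE B (Python) =====
-- abreviations_dict = {
--         'n' : 'north',
--         's' : 'south',
--         'e' : 'east',
--         'w' : 'west',
--         'i' : 'inventory',
--         'l' : 'look',
--         'get' : 'take',
--         'x' : 'examine',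
--         'q' : 'quit'
-- }
--
-- def input_cleanup(user_input):
--     # single character-level streaming scan: build each word char by char,
--     # and on each word boundary emit it (lowercased, abbreviation-expanded)
--     # unless it is an article; no split(), no map pass, no filter passes.
--     out = []
--     cur = []
--
--     def flush():
--         if cur:
--             w = ''.join(cur).lower()
--             w = abreviations_dict.get(w, w)
--             if w not in ('a', 'an', 'the'):
--                 out.append(w)
--             cur.clear()
--
--     for c in user_input:
--         if c.isspace():
--             flush()
--         else:
--             cur.append(c)
--     flush()
--     return out
-- ===== Notes on version B (the rewrite author's own statement) =====
-- stated objective: alternative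
-- what changed: Replaces A's staged pipeline (split into a word list, in-place index-tracking lowercase/abbreviation rewrite loop, then three separate list-rebuilding filter passes, one per article) with a single character-level streaming scanner that assembles each word char by char and emits it normalized and article-filtered at each word boundary, never materialising the intermediate word lists.
import Mathlib
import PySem

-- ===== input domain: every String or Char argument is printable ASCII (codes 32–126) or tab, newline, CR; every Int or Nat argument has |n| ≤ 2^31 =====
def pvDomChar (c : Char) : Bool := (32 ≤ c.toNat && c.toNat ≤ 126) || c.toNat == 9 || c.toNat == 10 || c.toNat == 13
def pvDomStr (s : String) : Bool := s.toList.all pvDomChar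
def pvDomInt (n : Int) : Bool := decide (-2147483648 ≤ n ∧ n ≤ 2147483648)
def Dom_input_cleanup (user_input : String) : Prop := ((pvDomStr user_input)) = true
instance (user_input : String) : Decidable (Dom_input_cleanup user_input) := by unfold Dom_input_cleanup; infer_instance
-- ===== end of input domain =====

-- B replaces A's staged pipeline (split, in-place map loop, three per-article filter passes)
-- by a single character-level streaming scanner (objective: alternative decomposition).

-- ===== PORT A =====
def pvArticlesLst : List String := ["a", "an", "the"]

def pvAbrevDict : PySem.Dict String String :=
  PySem.Dict.ofList [("n", "north"), ("s", "south"), ("e", "east"), ("w", "west"),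
    ("i", "inventory"), ("l", "look"), ("get", "take"), ("x", "examine"), ("q", "quit")]

def input_cleanup (user_input : String) : List String :=
  -- lst = []; lst.append(user_input); user_input_lst = lst[0].split()
  let lst : List String := [user_input]
  let user_input_lst := PySem.Str.split₀ (PySem.List.pyGetD lst 0 "")
  -- index-wise rewrite loop: word = word.lower(); abbreviation substitution
  let user_input_lst := user_input_lst.map (fun word =>
    let word := PySem.Str.lower word
    if pvAbrevDict.contains word then
      match pvAbrevDict.get? word with
      | some v => v
      | none => word          -- unreachable: guarded by contains
    else word)
  -- strip out articles: one list-rebuilding pass per article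
  pvArticlesLst.foldl (fun acc article => acc.filter (fun word => word != article)) user_input_lst

-- ===== PORT B =====
-- flush(): normalize the current word and emit it unless it is an article
def pvFlush (cur : List Char) (out : List String) : List String :=
  if cur.isEmpty then out
  else
    let w := PySem.Str.lower (String.ofList cur)
    let w := pvAbrevDict.getD w w
    if ["a", "an", "the"].contains w then out else out ++ [w]

-- the streaming loop: for c in user_input: if c.isspace(): flush() else cur.append(c)
def pvScan : List Char → List Char → List String → List String
  | [], cur, out => pvFlush cur out
  | c :: rest, cur, out =>
      if PySem.Chars.isspace c then pvScan rest [] (pvFlush cur out)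
      else pvScan rest (cur ++ [c]) out

def input_cleanup_alt (user_input : String) : List String :=
  pvScan user_input.toList [] []

-- ===== PRECONDITION & SPEC =====
def Spec_input_cleanup (user_input : String) (out : List String) : Prop := out = input_cleanup_alt user_input
instance (user_input : String) (out : List String) : Decidable (Spec_input_cleanup user_input out) := by unfold Spec_input_cleanup; infer_instance

-- ===== CLAIM =====
def Claim_equal_input_cleanup : Prop := ∀ (user_input : String), Dom_input_cleanup user_input → Spec_input_cleanup user_input (input_cleanup user_input)

-- ===== LEMMAS AND PROOFS =====

-- normalization of one word, as a String function (B inlines it in pvFlush)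
def pvNorm (w : String) : String :=
  let l := PySem.Str.lower w
  pvAbrevDict.getD l l

-- word-list semantics of B: normalize each word, drop articles
def pvF (ws : List (List Char)) : List String :=
  (ws.map (fun w => pvNorm (String.ofList w))).filter
    (fun w => !(["a", "an", "the"].contains w))

-- A's guarded dict lookup equals getD
theorem pv_map_eq (word : String) :
    (let w := PySem.Str.lower word
     if pvAbrevDict.contains w then
       match pvAbrevDict.get? w with
       | some v => v
       | none => w
     else w) = pvNorm word := by
  unfold pvNorm
  rw [PySem.Dict.getD_eq_get?_getD]
  cases h : pvAbrevDict.get? (PySem.Str.lower word) <;>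
    simp [PySem.Dict.contains_eq_isSome_get?, h]

-- A's three article filters collapse to one membership filter
theorem pv_filters_eq (l : List String) :
    pvArticlesLst.foldl (fun acc article => acc.filter (fun word => word != article)) l
      = l.filter (fun w => !(["a", "an", "the"].contains w)) := by
  simp only [pvArticlesLst, List.foldl_cons, List.foldl_nil, List.filter_filter]
  apply List.filter_congr
  intro w _
  simp only [List.contains, List.elem, bne]
  cases h1 : w == "a" <;> cases h2 : w == "an" <;> cases h3 : w == "the" <;> simp

-- pvF distributes over a leading word
theorem pvF_cons (w : List Char) (ws : List (List Char)) :
    pvF (w :: ws) = pvF [w] ++ pvF ws := by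
  simp only [pvF, List.map_cons, List.map_nil, List.filter_cons, List.filter_nil]
  split_ifs <;> simp

-- pvFlush is pvF of the (at most one) finished word
theorem pvFlush_eq (cur : List Char) (out : List String) :
    pvFlush cur out = out ++ pvF (if cur.isEmpty then [] else [cur]) := by
  rcases cur with _ | ⟨c, cs⟩
  · simp [pvFlush, pvF]
  · simp only [pvFlush, pvNorm, pvF, List.isEmpty_cons, Bool.false_eq_true,
      ite_false, List.map_cons, List.map_nil, List.filter_cons, List.filter_nil]
    cases h : (["a", "an", "the"] : List String).contains
        (pvAbrevDict.getD (PySem.Str.lower (String.ofList (c :: cs)))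
          (PySem.Str.lower (String.ofList (c :: cs)))) <;>
      simp_all

-- split₀.go's accumulator only collects already-finished words
theorem split0_go_acc (cs : List Char) :
    ∀ (cur : List Char) (acc : List (List Char)),
      PySem.Chars.split₀.go cs cur acc = acc.reverse ++ PySem.Chars.split₀.go cs cur [] := by
  induction cs with
  | nil =>
      intro cur acc
      simp only [PySem.Chars.split₀.go]
      split_ifs <;> simp
  | cons c rest ih =>
      intro cur acc
      simp only [PySem.Chars.split₀.go]
      split_ifs with hsp hcur
      · rw [ih [] acc, ih [] []]
      · rw [ih [] (cur.reverse :: acc), ih [] [cur.reverse]]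
        simp
      · exact ih (c :: cur) acc

-- the streaming scanner computes pvF of the words split₀ produces
theorem pvScan_eq (cs : List Char) :
    ∀ (cur : List Char) (out : List String),
      pvScan cs cur out = out ++ pvF (PySem.Chars.split₀.go cs cur.reverse []) := by
  induction cs with
  | nil =>
      intro cur out
      simp only [pvScan]
      rw [pvFlush_eq]
      simp only [PySem.Chars.split₀.go, List.reverse_reverse]
      rcases cur with _ | ⟨c, cs'⟩ <;> simp
  | cons c rest ih =>
      intro cur out
      have hgo : PySem.Chars.split₀.go (c :: rest) cur.reverse [] =
          if PySem.Chars.isspace c = true then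
            (if cur.reverse.isEmpty then PySem.Chars.split₀.go rest [] []
             else PySem.Chars.split₀.go rest [] [cur.reverse.reverse])
          else PySem.Chars.split₀.go rest (c :: cur.reverse) [] := by
        simp only [PySem.Chars.split₀.go]
      simp only [pvScan]
      by_cases hsp : PySem.Chars.isspace c = true
      · rw [if_pos hsp, ih [] (pvFlush cur out), hgo, if_pos hsp]
        rcases cur with _ | ⟨d, cs'⟩
        · simp [pvFlush]
        · rw [if_neg (by simp), List.reverse_reverse,
            split0_go_acc rest [] [d :: cs'], pvFlush_eq]
          simp only [List.reverse_singleton, List.singleton_append, List.reverse_nil,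
            List.isEmpty_cons, Bool.false_eq_true, ite_false]
          conv_rhs => rw [pvF_cons]
          simp [pvF]
      · rw [if_neg hsp, ih (cur ++ [c]) out, hgo, if_neg hsp]
        simp

theorem input_cleanup_eq (user_input : String) :
    input_cleanup user_input = input_cleanup_alt user_input := by
  simp only [input_cleanup, input_cleanup_alt]
  have h0 : PySem.List.pyGetD [user_input] 0 "" = user_input := by
    simp [PySem.List.pyGetD, PySem.List.pyGet?, PySem.List.pyIdx?]
  rw [h0, pv_filters_eq, pvScan_eq user_input.toList [] []]
  simp only [List.reverse_nil, List.nil_append]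
  have hs : PySem.Str.split₀ user_input
      = (PySem.Chars.split₀ user_input.toList).map String.ofList := by
    simp [PySem.Str.split₀]
  rw [hs]
  unfold pvF PySem.Chars.split₀
  rw [List.map_map, List.map_congr_left]
  intro w _
  exact pv_map_eq (String.ofList w)

-- ===== VERDICT =====
theorem input_cleanup_spec : Claim_equal_input_cleanup := by
  intro user_input _
  unfold Spec_input_cleanup
  exact input_cleanup_eq user_input
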